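-- pv_equiv track=rewrite | github.com/davidgardenier/chromos | plots/hh_bursters_pulsars.py | findbestres
-- ===== SOURCE A (Python) =====
-- def findbestres(res):
--     '''Find the smallest resolution from a list of resolutions'''
--
--     # Split resolutions into values and units
--     heads = []
--     tails = []
--     for s in res:
--         unit = s.strip('0123456789')
--         num = s[:-len(unit)]
--         heads.append(num)
--         tails.append(unit)
--
--     # Sort by unit, then by value
--     unitorder = ['us','ms','s']
--     for u in unitorder:
--         if u in tails:
--             indices = [i for i, x in enumerate(tails) if x==u]
--             sameunits = [heads[i] for i in indices]
--             sortvalues = sorted(sameunits)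
--             return sortvalues[0]+u
-- ===== SOURCE B (Python) =====
-- def findbestres(res):
--     '''Find the smallest resolution from a list of resolutions'''
--     # Single pass: keep the lexicographically smallest (unit_rank, value) key seen
--     # so far; no grouping, no sorting, no second loop over units.
--     order = {'us': 0, 'ms': 1, 's': 2}
--     names = ['us', 'ms', 's']
--     best = None
--     for s in res:
--         unit = s.strip('0123456789')
--         r = order.get(unit)
--         if r is not None:
--             key = (r, s[:-len(unit)])
--             if best is None or key < best:
--                 best = key
--     if best is not None:
--         return best[1] + names[best[0]]
-- ===== Notes on version B (the rewrite author's own statement) =====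
-- stated objective: simpler
-- what changed: Replaces A's two-phase design (build parallel heads/tails lists, then per priority unit scan tails with enumerate, collect indices, re-index heads and fully sort the group) with a single streaming pass that keeps only the running minimum (unit_rank, value) key under tuple order and emits it at the end; no grouping lists, no sort, no second loop.
-- outside the precondition, e.g. on findbestres(['abc', '123']): A returns None, B returns None
import Mathlib
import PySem

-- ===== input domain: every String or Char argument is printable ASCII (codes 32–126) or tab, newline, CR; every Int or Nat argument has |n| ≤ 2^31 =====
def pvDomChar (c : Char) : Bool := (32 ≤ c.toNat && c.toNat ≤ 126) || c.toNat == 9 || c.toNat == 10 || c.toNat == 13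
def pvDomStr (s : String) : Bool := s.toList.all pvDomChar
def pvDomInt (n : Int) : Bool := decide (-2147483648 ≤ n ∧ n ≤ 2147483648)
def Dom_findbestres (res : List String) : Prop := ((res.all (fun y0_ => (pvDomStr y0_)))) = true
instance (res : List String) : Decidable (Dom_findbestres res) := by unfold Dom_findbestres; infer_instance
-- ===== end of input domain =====

-- B replaces A's parallel heads/tails lists, per-unit enumerate/index comprehensions and full sort
-- with a single pass keeping the lexicographically smallest (unit-rank, value) key: simpler, one loop.


-- ===== PORT A =====
-- the 'for u in unitorder' loop with its early return; 'sortvalues[0]' is guarded by 'u in tails',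
-- so the list is nonempty and headD is exact there
def findbestresLoopA (heads tails : List String) : List String → Option String
  | [] => none
  | u :: rest =>
    if u ∈ tails then
      let indices := ((PySem.List.enumerate tails 0).filter (fun p => p.2 == u)).map (fun p => p.1)
      let sameunits := indices.map (fun i => (PySem.List.pyGet? heads i).getD "")
      let sortvalues := PySem.List.sorted sameunits (fun x => x) false
      some (sortvalues.headD "" ++ u)
    else findbestresLoopA heads tails rest

def findbestres (res : List String) : String :=
  let ht := res.foldl (fun (ht : List String × List String) s =>
      let unit := PySem.Str.stripChars s "0123456789"
      let num := PySem.Str.slice s none (some (-(PySem.Str.len unit)))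
      (ht.1 ++ [num], ht.2 ++ [unit])) ([], [])
  (findbestresLoopA ht.1 ht.2 ["us", "ms", "s"]).getD ""

-- ===== PORT B =====
-- Python tuple '<' on (int, str) keys, lexicographic
def pyLtKey (a b : Int × String) : Bool := a.1 < b.1 || (a.1 == b.1 && a.2 < b.2)

def findbestres_alt (res : List String) : String :=
  let order : PySem.Dict String Int := PySem.Dict.ofList [("us", 0), ("ms", 1), ("s", 2)]
  let best := res.foldl (fun (best : Option (Int × String)) s =>
      let unit := PySem.Str.stripChars s "0123456789"
      match order.get? unit with
      | none => best
      | some r =>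
        let key := (r, PySem.Str.slice s none (some (-(PySem.Str.len unit))))
        match best with
        | none => some key
        | some b => if pyLtKey key b then some key else best) none
  match best with
  | none => ""   -- Python B returns None here; excluded by Pre_
  | some (r, num) => num ++ (PySem.List.pyGet? ["us", "ms", "s"] r).getD ""

-- ===== PRECONDITION & SPEC =====
-- Pre_ excludes exactly the lists in which no element's digit-stripped unit is 'us', 'ms' or 's':
-- there Python A falls off its loop and returns None, which is not a str.
def Pre_findbestres (res : List String) : Prop :=
  ∃ s ∈ res, PySem.Str.stripChars s "0123456789" ∈ (["us", "ms", "s"] : List String)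
instance (res : List String) : Decidable (Pre_findbestres res) := by
  unfold Pre_findbestres; infer_instance

def pvWitness_findbestres : List String := ["10ms", "2us"]

def Spec_findbestres (res : List String) (out : String) : Prop := out = findbestres_alt res
instance (res : List String) (out : String) : Decidable (Spec_findbestres res out) := by
  unfold Spec_findbestres; infer_instance

-- ===== CLAIM (what is proved, stated in full; the proofs are below) =====
def Claim_equal_findbestres : Prop :=
  ∀ (res : List String), Dom_findbestres res → Pre_findbestres res →
    Spec_findbestres res (findbestres res)

-- ===== LEMMAS AND PROOFS =====

-- the parsing of one element, shared by the proofs (not by the ports)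
def pvUnit (s : String) : String := PySem.Str.stripChars s "0123456789"
def pvNum (s : String) : String := PySem.Str.slice s none (some (-(PySem.Str.len (pvUnit s))))
def pvPairs (res : List String) : List (String × String) := res.map (fun s => (pvUnit s, pvNum s))

def pvRank? (u : String) : Option Int :=
  if u = "us" then some 0 else if u = "ms" then some 1 else if u = "s" then some 2 else none

def pvKeys (res : List String) : List (Int × String) :=
  res.filterMap (fun s => (pvRank? (pvUnit s)).map (fun r => (r, pvNum s)))

-- non-strict lexicographic order on keys
def pvLe (a b : Int × String) : Prop := a.1 < b.1 ∨ (a.1 = b.1 ∧ a.2 ≤ b.2)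

def pvLt (a b : Int × String) : Prop := a.1 < b.1 ∨ (a.1 = b.1 ∧ a.2 < b.2)

theorem pyLtKey_iff (a b : Int × String) : pyLtKey a b = true ↔ pvLt a b := by
  unfold pyLtKey pvLt
  simp

theorem not_pvLt_iff (a b : Int × String) : ¬ pvLt a b ↔ pvLe b a := by
  unfold pvLt pvLe
  constructor
  · intro h
    rcases lt_trichotomy b.1 a.1 with h1 | h1 | h1
    · exact Or.inl h1
    · exact Or.inr ⟨h1, le_of_not_gt (fun hs => h (Or.inr ⟨h1.symm, hs⟩))⟩
    · exact absurd (Or.inl h1) h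
  · rintro (h1 | ⟨h1, h2⟩) (g1 | ⟨g1, g2⟩)
    · omega
    · omega
    · omega
    · exact absurd g2 (not_lt_of_ge h2)

theorem pvLtKey_false_iff (a b : Int × String) : pyLtKey a b = false ↔ pvLe b a := by
  rw [← not_pvLt_iff, ← pyLtKey_iff]
  simp

theorem pvLe_trans {a b c : Int × String} (h1 : pvLe a b) (h2 : pvLe b c) : pvLe a c := by
  unfold pvLe at *
  rcases h1 with h1 | ⟨h1, h1'⟩ <;> rcases h2 with h2 | ⟨h2, h2'⟩
  · exact Or.inl (by omega)
  · exact Or.inl (by omega)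
  · exact Or.inl (by omega)
  · exact Or.inr ⟨by omega, le_trans h1' h2'⟩

-- A's accumulating fold builds exactly the two mapped lists
theorem foldA_eq (res : List String) (acc : List String × List String) :
    res.foldl (fun (ht : List String × List String) s =>
      let unit := PySem.Str.stripChars s "0123456789"
      let num := PySem.Str.slice s none (some (-(PySem.Str.len unit)))
      (ht.1 ++ [num], ht.2 ++ [unit])) acc
    = (acc.1 ++ res.map pvNum, acc.2 ++ res.map pvUnit) := by
  induction res generalizing acc with
  | nil => simp
  | cons x xs ih =>
    rw [List.foldl_cons, ih]
    simp [pvNum, pvUnit]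

-- the three-entry dict lookup in B is pvRank?
theorem order_get?_eq (u : String) :
    (PySem.Dict.ofList [("us", (0 : Int)), ("ms", 1), ("s", 2)]).get? u = pvRank? u := by
  rw [show (PySem.Dict.ofList [("us", (0 : Int)), ("ms", 1), ("s", 2)])
      = PySem.Dict.mk [("us", 0), ("ms", 1), ("s", 2)] from by decide]
  unfold pvRank?
  by_cases h1 : u = "us" <;> by_cases h2 : u = "ms" <;> by_cases h3 : u = "s" <;>
    simp_all [PySem.Dict.get?]
  exact ⟨fun h => h1 h.symm, fun h => h2 h.symm, fun h => h3 h.symm⟩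

-- B's tournament step over the key list
def pvStep (best : Option (Int × String)) (k : Int × String) : Option (Int × String) :=
  match best with
  | none => some k
  | some b => if pyLtKey k b then some k else best

-- B's fold over res is the tournament fold over the extracted keys
theorem foldB_eq (res : List String) (acc : Option (Int × String)) :
    res.foldl (fun (best : Option (Int × String)) s =>
      let unit := PySem.Str.stripChars s "0123456789"
      match (PySem.Dict.ofList [("us", (0 : Int)), ("ms", 1), ("s", 2)]).get? unit with
      | none => best
      | some r =>
        let key := (r, PySem.Str.slice s none (some (-(PySem.Str.len unit))))
        match best with
        | none => some key
        | some b => if pyLtKey key b then some key else best) acc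
    = (pvKeys res).foldl pvStep acc := by
  induction res generalizing acc with
  | nil => simp [pvKeys]
  | cons x xs ih =>
    rw [List.foldl_cons]
    show _ = ((x :: xs).filterMap _).foldl pvStep acc
    rw [List.filterMap_cons]
    rcases h : pvRank? (pvUnit x) with _ | r
    · simp only [order_get?_eq, pvUnit] at *
      rw [h]; simp only [Option.map_none]
      exact ih acc
    · simp only [order_get?_eq, pvUnit] at *
      rw [h]; simp only [Option.map_some, List.foldl_cons]
      rw [ih]
      rfl

-- the tournament fold starting from some b returns a minimum of b and the list
theorem foldMin_spec (t : List (Int × String)) (b : Int × String) :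
    ∃ m, t.foldl pvStep (some b) = some m ∧ (m = b ∨ m ∈ t) ∧ pvLe m b ∧ ∀ k ∈ t, pvLe m k := by
  induction t generalizing b with
  | nil => exact ⟨b, rfl, Or.inl rfl, Or.inr ⟨rfl, le_refl _⟩, by simp⟩
  | cons k t ih =>
    rw [List.foldl_cons]
    show ∃ m, t.foldl pvStep (pvStep (some b) k) = some m ∧ _
    rcases hlt : pyLtKey k b with _ | _
    · have hle : pvLe b k := (pvLtKey_false_iff k b).1 hlt
      simp only [pvStep, hlt, Bool.false_eq_true, if_false]
      obtain ⟨m, hm, hmem, hmb, hall⟩ := ih b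
      refine ⟨m, hm, ?_, hmb, ?_⟩
      · rcases hmem with rfl | h
        · exact Or.inl rfl
        · exact Or.inr (List.mem_cons_of_mem _ h)
      · intro k' hk'
        rcases List.mem_cons.1 hk' with rfl | hk'
        · exact pvLe_trans hmb hle
        · exact hall k' hk'
    · have hle : pvLe k b := by
        have := (pyLtKey_iff k b).1 hlt
        unfold pvLt at this
        unfold pvLe
        rcases this with h | ⟨h, h'⟩
        · exact Or.inl h
        · exact Or.inr ⟨h, le_of_lt h'⟩
      simp only [pvStep, hlt, if_true]
      obtain ⟨m, hm, hmem, hmb, hall⟩ := ih k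
      refine ⟨m, hm, ?_, pvLe_trans hmb hle, ?_⟩
      · rcases hmem with rfl | h
        · exact Or.inr List.mem_cons_self
        · exact Or.inr (List.mem_cons_of_mem _ h)
      · intro k' hk'
        rcases List.mem_cons.1 hk' with rfl | hk'
        · exact hmb
        · exact hall k' hk'

-- A's enumerate/filter/index-lookup comprehension equals the direct filter of the pairs
set_option maxRecDepth 4000 in
theorem sameunits_eq (u : String) (heads : List String)
    (pairs : List (String × String)) (s : Nat)
    (h : ∀ k, k < pairs.length → heads[s + k]? = (pairs[k]?).map (fun p => p.2)) :
    (((PySem.List.enumerate (pairs.map (fun p => p.1)) (s : Int)).filter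
        (fun p => p.2 == u)).map (fun p => (PySem.List.pyGet? heads p.1).getD ""))
    = (pairs.filter (fun p => p.1 == u)).map (fun p => p.2) := by
  induction pairs generalizing s with
  | nil => simp
  | cons p ps ih =>
    have hs1 : ((s : Int) + 1) = ((s + 1 : Nat) : Int) := by push_cast; ring
    have h0 : heads[s]? = some p.2 := by
      have := h 0 (by simp)
      simpa using this
    have htail : ∀ k, k < ps.length → heads[(s + 1) + k]? = (ps[k]?).map (fun q => q.2) := by
      intro k hk
      have := h (k + 1) (by simpa using Nat.succ_lt_succ hk)
      simpa [Nat.add_assoc, Nat.add_comm 1 k] using this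
    have ihh := ih (s + 1) htail
    by_cases hp : (p.1 == u) = true
    · simp only [List.map_cons, PySem.List.enumerate_cons, hs1, List.filter_cons, hp, if_true,
        ihh, PySem.List.pyGet?_natCast, h0, Option.getD_some]
    · simp only [List.map_cons, PySem.List.enumerate_cons, hs1, List.filter_cons, hp, if_false,
        Bool.false_eq_true, ihh]

-- head of the (stable) sort equals a least element when one exists
theorem head_sorted_eq (l : List String) (m : String) (hmem : m ∈ l)
    (hmin : ∀ y ∈ l, m ≤ y) :
    (PySem.List.sorted l (fun x => x) false).headD "" = m := by
  rcases hs : PySem.List.sorted l (fun x => x) false with _ | ⟨h, t⟩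
  · have := (PySem.List.sorted_eq_nil_iff l (fun x => x) false).1 hs
    subst this; simp at hmem
  · have hhmem : h ∈ l := by
      have : h ∈ PySem.List.sorted l (fun x => x) false := by rw [hs]; exact List.mem_cons_self
      exact (PySem.List.mem_sorted l (fun x => x) false h).1 this
    have h1 : h ≤ m := PySem.List.key_head_sorted_le l (fun x => x) hs m hmem
    have h2 : m ≤ h := hmin h hhmem
    simp [le_antisymm h1 h2]

-- nums at a given unit, as filtered pairs
def pvNums (res : List String) (u : String) : List String :=
  ((pvPairs res).filter (fun p => p.1 == u)).map (fun p => p.2)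

theorem rank?_eq_some_iff (u : String) (r : Int) :
    pvRank? u = some r ↔ (r = 0 ∧ u = "us") ∨ (r = 1 ∧ u = "ms") ∨ (r = 2 ∧ u = "s") := by
  unfold pvRank?
  split_ifs with h1 h2 h3 <;> subst_vars <;>
    simp_all [show ("us" : String) ≠ "ms" from by decide, show ("us" : String) ≠ "s" from by decide,
      show ("ms" : String) ≠ "s" from by decide] <;>
    omega

-- the nums whose unit names rank r are exactly the keys of rank r
theorem nums_eq_keys_filter (res : List String) (u : String) (r : Int)
    (hu : pvRank? u = some r) :
    pvNums res u = ((pvKeys res).filter (fun k => k.1 == r)).map (fun k => k.2) := by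
  unfold pvNums pvKeys pvPairs
  induction res with
  | nil => simp
  | cons x xs ih =>
    simp only [List.map_cons, List.filter_cons, List.filterMap_cons]
    rcases h : pvRank? (pvUnit x) with _ | r'
    · have hne : ((pvUnit x, pvNum x).1 == u) = false := by
        simp only [beq_eq_false_iff_ne, ne_eq]
        intro he; rw [he, hu] at h; exact Option.some_ne_none r h
      simp only [hne, Bool.false_eq_true, if_false, Option.map_none, ih]
    · simp only [Option.map_some, List.filter_cons]
      by_cases he : pvUnit x = u
      · rw [he, hu] at h
        obtain rfl : r = r' := Option.some.inj h
        simp [he, ih]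
      · have hrne : r' ≠ r := by
          intro hre; subst hre
          rcases (rank?_eq_some_iff _ _).1 h with ⟨_, h1⟩ | ⟨_, h1⟩ | ⟨_, h1⟩ <;>
            rcases (rank?_eq_some_iff _ _).1 hu with ⟨hr, h2⟩ | ⟨hr, h2⟩ | ⟨hr, h2⟩ <;>
            first | (exact he (h1.trans h2.symm)) | omega
        simp only [show ((pvUnit x, pvNum x).1 == u) = false by simpa using he,
          Bool.false_eq_true, if_false,
          show (((r', pvNum x) : Int × String).1 == r) = false by simpa using hrne,
          ih]

-- every key's rank is 0, 1 or 2
theorem keys_rank_mem (res : List String) (k : Int × String) (hk : k ∈ pvKeys res) :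
    k.1 = 0 ∨ k.1 = 1 ∨ k.1 = 2 := by
  unfold pvKeys at hk
  obtain ⟨s, _, hs⟩ := List.mem_filterMap.1 hk
  rcases h : pvRank? (pvUnit s) with _ | r
  · rw [h] at hs; simp at hs
  · rw [h] at hs
    obtain rfl : (r, pvNum s) = k := Option.some.inj hs
    rcases (rank?_eq_some_iff _ _).1 h with ⟨hr, _⟩ | ⟨hr, _⟩ | ⟨hr, _⟩ <;> simp [hr]

-- membership in tails is non-emptiness of the filtered nums
theorem mem_tails_iff (res : List String) (u : String) :
    u ∈ (pvPairs res).map (fun p => p.1) ↔ pvNums res u ≠ [] := by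
  unfold pvNums
  constructor
  · intro hu hnil
    rcases List.mem_map.1 hu with ⟨p, hp, rfl⟩
    rw [List.map_eq_nil_iff, List.filter_eq_nil_iff] at hnil
    have := hnil p hp
    simp at this
  · intro hne
    rw [List.mem_map]
    by_contra hno
    push Not at hno
    apply hne
    rw [List.map_eq_nil_iff, List.filter_eq_nil_iff]
    intro p hp
    simp only [beq_iff_eq]
    exact fun hpe => hno p hp hpe

-- A's loop at one unit, rewritten through sameunits_eq
theorem loopA_cons (res : List String) (u : String) (rest : List String) :
    findbestresLoopA ((pvPairs res).map (fun p => p.2)) ((pvPairs res).map (fun p => p.1))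
        (u :: rest)
    = if pvNums res u ≠ [] then
        some ((PySem.List.sorted (pvNums res u) (fun x => x) false).headD "" ++ u)
      else findbestresLoopA ((pvPairs res).map (fun p => p.2)) ((pvPairs res).map (fun p => p.1))
        rest := by
  have hidx : ∀ k, k < (pvPairs res).length →
      ((pvPairs res).map (fun p => p.2))[0 + k]? = ((pvPairs res)[k]?).map (fun p => p.2) := by
    intro k hk; simp
  have hsame := sameunits_eq u ((pvPairs res).map (fun p => p.2)) (pvPairs res) 0 hidx
  simp only [findbestresLoopA]
  by_cases hu : u ∈ (pvPairs res).map (fun p => p.1)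
  · have hne := (mem_tails_iff res u).1 hu
    simp only [hu, if_true, hne, ne_eq, not_false_eq_true, if_true]
    rw [List.map_map]
    have : ((PySem.List.enumerate ((pvPairs res).map (fun p => p.1)) 0).filter
        (fun p => p.2 == u)).map
          ((fun i => (PySem.List.pyGet? ((pvPairs res).map (fun p => p.2)) i).getD "") ∘
            (fun p => p.1))
        = pvNums res u := by
      simpa [Function.comp, pvNums] using hsame
    rw [this]
  · have hnil : ¬ pvNums res u ≠ [] := fun hne => hu ((mem_tails_iff res u).2 hne)
    simp only [hu, if_false, hnil]

-- ===== VERDICT (by name: the statement is the Claim_ definition above) =====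
theorem findbestres_spec : Claim_equal_findbestres := by
  intro res _hd hp
  unfold Spec_findbestres
  have hB : findbestres_alt res = (match (pvKeys res).foldl pvStep none with
      | none => ""
      | some (r, num) => num ++ (PySem.List.pyGet? ["us", "ms", "s"] r).getD "") := by
    show (match res.foldl (fun (best : Option (Int × String)) s =>
        let unit := PySem.Str.stripChars s "0123456789"
        match (PySem.Dict.ofList [("us", (0 : Int)), ("ms", 1), ("s", 2)]).get? unit with
        | none => best
        | some r =>
          let key := (r, PySem.Str.slice s none (some (-(PySem.Str.len unit))))
          match best with
          | none => some key
          | some b => if pyLtKey key b then some key else best) none with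
      | none => ""
      | some (r, num) => num ++ (PySem.List.pyGet? ["us", "ms", "s"] r).getD "") = _
    rw [foldB_eq]
  rw [hB]
  unfold findbestres
  rw [foldA_eq]
  have hh : ([] : List String) ++ res.map pvNum = (pvPairs res).map (fun p => p.2) := by
    simp [pvPairs, List.map_map, Function.comp]
  have ht : ([] : List String) ++ res.map pvUnit = (pvPairs res).map (fun p => p.1) := by
    simp [pvPairs, List.map_map, Function.comp]
  simp only [hh, ht]
  -- Pre_ gives a nonempty key list
  obtain ⟨s, hs, hsu⟩ := hp
  have hkeys_ne : pvKeys res ≠ [] := by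
    have hr : ∃ r, pvRank? (PySem.Str.stripChars s "0123456789") = some r := by
      simp only [List.mem_cons, List.not_mem_nil, or_false] at hsu
      rcases hsu with h | h | h <;> rw [h] <;> exact ⟨_, rfl⟩
    obtain ⟨r, hr⟩ := hr
    intro hnil
    unfold pvKeys at hnil
    rw [List.filterMap_eq_nil_iff] at hnil
    have := hnil s hs
    rw [show pvUnit s = PySem.Str.stripChars s "0123456789" from rfl, hr] at this
    simp at this
  rcases hk : pvKeys res with _ | ⟨k0, kt⟩
  · exact absurd hk hkeys_ne
  · rw [List.foldl_cons]
    have hstep0 : pvStep none k0 = some k0 := rfl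
    rw [hstep0]
    obtain ⟨m, hm, hmem, _hmb, hall⟩ := foldMin_spec kt k0
    rw [hm]
    have hmmem : m ∈ pvKeys res := by
      rw [hk]; rcases hmem with rfl | h
      · exact List.mem_cons_self
      · exact List.mem_cons_of_mem _ h
    have hmin : ∀ k ∈ pvKeys res, pvLe m k := by
      intro k hkmem
      rw [hk] at hkmem
      rcases List.mem_cons.1 hkmem with rfl | h
      · rcases hmem with rfl | hmt
        · exact Or.inr ⟨rfl, le_refl _⟩
        · exact _hmb
      · exact hall k h
    -- the nums with unit naming m.1 contain m.2 and are ≥ m.2; lower units are empty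
    have hrank := keys_rank_mem res m hmmem
    have hmain : ∀ r : Int, ∀ u : String, pvRank? u = some r →
        (r = m.1 → pvNums res u ≠ [] ∧
          (PySem.List.sorted (pvNums res u) (fun x => x) false).headD "" = m.2) ∧
        (r < m.1 → pvNums res u = []) := by
      intro r u hu
      constructor
      · rintro rfl
        have hfe : pvNums res u = ((pvKeys res).filter (fun k => k.1 == m.1)).map (fun k => k.2) :=
          nums_eq_keys_filter res u m.1 hu
        have hm2 : m.2 ∈ pvNums res u := by
          rw [hfe]
          exact List.mem_map.2 ⟨m, List.mem_filter.2 ⟨hmmem, by simp⟩, rfl⟩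
        have hmle : ∀ y ∈ pvNums res u, m.2 ≤ y := by
          intro y hy
          rw [hfe] at hy
          obtain ⟨k, hkf, rfl⟩ := List.mem_map.1 hy
          obtain ⟨hkmem, hkr⟩ := List.mem_filter.1 hkf
          have := hmin k hkmem
          have hk1 : k.1 = m.1 := by simpa using hkr
          rcases this with h | ⟨_, h⟩
          · omega
          · exact h
        exact ⟨List.ne_nil_of_mem hm2, head_sorted_eq _ _ hm2 hmle⟩
      · intro hlt
        have hfe := nums_eq_keys_filter res u r hu
        rw [hfe, List.map_eq_nil_iff, List.filter_eq_nil_iff]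
        intro k hkmem
        have := hmin k hkmem
        simp only [beq_iff_eq]
        intro hkr
        rcases this with h | ⟨h, _⟩ <;> omega
    have hus := hmain 0 "us" (by simp [pvRank?])
    have hms := hmain 1 "ms" (by simp [pvRank?])
    have hss := hmain 2 "s" (by simp [pvRank?])
    rcases hrank with h0 | h1 | h2
    · rw [loopA_cons]
      obtain ⟨hne, hhead⟩ := hus.1 h0.symm
      simp only [hne, ne_eq, not_false_eq_true, if_true, hhead]
      obtain ⟨r, num⟩ := m
      simp only at h0
      subst h0
      rfl
    · rw [loopA_cons, loopA_cons]
      obtain ⟨hne, hhead⟩ := hms.1 h1.symm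
      have hempty := hus.2 (by omega)
      simp only [hempty, ne_eq, not_true_eq_false, if_false, hne, not_false_eq_true, if_true, hhead]
      obtain ⟨r, num⟩ := m
      simp only at h1
      subst h1
      rfl
    · rw [loopA_cons, loopA_cons, loopA_cons]
      obtain ⟨hne, hhead⟩ := hss.1 h2.symm
      have hempty1 := hus.2 (by omega)
      have hempty2 := hms.2 (by omega)
      simp only [hempty1, hempty2, ne_eq, not_true_eq_false, if_false, hne, not_false_eq_true,
        if_true, hhead]
      obtain ⟨r, num⟩ := m
      simp only at h2
      subst h2
      rfl
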